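-- pv_equiv track=rewrite | github.com/nju-websoft/EPR-KGQA | evidence_pattern_retrieval/ep_size_threshold.py | get_fact_cnt_4_item
-- ===== SOURCE A (Python) =====
-- def get_fact_cnt_4_path(path):
--     ans = 0
--     for rel in path[1::]:
--         if rel.find("...") != -1:
--             ans += 2
--         else:
--             ans += 1
--     return ans
--
-- def get_fact_cnt_4_item(paths):
--     ans = 0
--     ent_facts_cnt = dict()
--     for path in paths:
--         if path[0] not in ent_facts_cnt:
--             ent_facts_cnt[path[0]] = get_fact_cnt_4_path(path)
--         else:
--             ent_facts_cnt[path[0]] = min(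
--                 ent_facts_cnt[path[0]], get_fact_cnt_4_path(path)
--             )
--     for ent in ent_facts_cnt:
--         ans += ent_facts_cnt[ent]
--     return ans
-- ===== SOURCE B (Python) =====
-- def get_fact_cnt_4_item(paths):
--     # recursion on distinct entities: take the first path's entity, scan for the
--     # minimal fact count of that entity, recurse on the remaining entities' paths
--     if not paths:
--         return 0
--     k = paths[0][0]
--     best = min(
--         len(p) - 1 + sum(1 for rel in p[1:] if "..." in rel)
--         for p in paths
--         if p[0] == k
--     )
--     return best + get_fact_cnt_4_item([p for p in paths if p[0] != k])
-- ===== Notes on version B (the rewrite author's own statement) =====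
-- stated objective: alternative
-- what changed: Replaces A's dict of running minima plus a summing pass by a dict-free recursion on distinct entities: pick the first path's entity, take the minimum count among its paths by a direct scan (with the count computed as len(path)-1 plus the number of '...'-relations instead of A's 1/2-accumulator loop), and recurse on the paths of the remaining entities.
import Mathlib
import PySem

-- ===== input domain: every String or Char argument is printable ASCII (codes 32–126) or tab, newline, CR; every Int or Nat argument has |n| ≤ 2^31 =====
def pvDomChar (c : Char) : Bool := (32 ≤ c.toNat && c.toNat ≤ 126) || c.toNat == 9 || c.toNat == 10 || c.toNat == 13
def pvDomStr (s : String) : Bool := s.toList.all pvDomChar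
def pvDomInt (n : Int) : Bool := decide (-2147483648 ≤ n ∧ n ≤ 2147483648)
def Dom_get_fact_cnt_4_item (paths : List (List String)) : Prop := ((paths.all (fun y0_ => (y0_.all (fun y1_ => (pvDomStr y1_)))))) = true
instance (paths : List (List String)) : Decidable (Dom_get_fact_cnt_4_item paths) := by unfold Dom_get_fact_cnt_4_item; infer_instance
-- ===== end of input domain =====

-- B replaces A's running-minimum dict (plus summing pass) with a dict-free recursion on distinct entities: scan for the first entity's minimal count, recurse on the other entities' paths; alternative structure, same result.

-- ===== PORT A =====
-- helper of A: per-path accumulator loop over path[1::]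
def get_fact_cnt_4_path (path : List String) : Int :=
  (PySem.List.slice path (some 1) none).foldl
    (fun ans rel => if PySem.Str.find rel "..." ≠ -1 then ans + 2 else ans + 1) 0

def get_fact_cnt_4_item (paths : List (List String)) : Int :=
  let d := paths.foldl
    (fun d path =>
      let k := (PySem.List.pyGet? path 0).getD ""   -- path[0]; Pre_ excludes the empty path (IndexError)
      if d.contains k = false then
        d.insert k (get_fact_cnt_4_path path)
      else
        d.insert k (min (d.getD k 0) (get_fact_cnt_4_path path)))
    (PySem.Dict.empty : PySem.Dict String Int)
  d.keys.foldl (fun ans ent => ans + d.getD ent 0) 0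

-- ===== PORT B =====
-- B's inline expressions, as named helpers: path[0] and len(p)-1+sum(1 for rel in p[1:] if "..." in rel)
def pvKeyB (path : List String) : String := (PySem.List.pyGet? path 0).getD ""   -- path[0]; Pre_ excludes the empty path (IndexError)
def pvCntB (path : List String) : Int :=
  PySem.List.len path - 1 +
    ((PySem.List.slice path (some 1) none).countP (fun rel => PySem.Str.isIn "..." rel) : Int)

def get_fact_cnt_4_item_alt : List (List String) → Int
  | [] => 0
  | p :: rest =>
      let k := pvKeyB p
      let best := (PySem.List.min? (((p :: rest).filter (fun q => pvKeyB q == k)).map pvCntB)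
        (fun x => x)).getD 0   -- min(...) over a nonempty generator (p itself qualifies), so the default is never used
      best + get_fact_cnt_4_item_alt ((p :: rest).filter (fun q => pvKeyB q != k))
  termination_by paths => paths.length
  decreasing_by
    simp
    exact List.length_filter_le _ _

-- ===== PRECONDITION & SPEC =====
-- Pre_ excludes inputs containing an empty path: there A (and B alike) raises IndexError on path[0].
def Pre_get_fact_cnt_4_item (paths : List (List String)) : Prop := ∀ path ∈ paths, path ≠ []
instance (paths : List (List String)) : Decidable (Pre_get_fact_cnt_4_item paths) := by unfold Pre_get_fact_cnt_4_item; infer_instance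

def pvWitness_get_fact_cnt_4_item : List (List String) := [["a", "r"], ["a", "q...z"], ["b"]]

def Spec_get_fact_cnt_4_item (paths : List (List String)) (out : Int) : Prop := out = get_fact_cnt_4_item_alt paths
instance (paths : List (List String)) (out : Int) : Decidable (Spec_get_fact_cnt_4_item paths out) := by unfold Spec_get_fact_cnt_4_item; infer_instance

-- ===== CLAIM (what is proved, stated in full; the proofs are below) =====
def Claim_equal_get_fact_cnt_4_item : Prop := ∀ (paths : List (List String)), Dom_get_fact_cnt_4_item paths → Pre_get_fact_cnt_4_item paths → Spec_get_fact_cnt_4_item paths (get_fact_cnt_4_item paths)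

-- ===== LEMMAS AND PROOFS =====

-- shared vocabulary: the per-path fact count and the (entity, count) pair list
def pvCnt (path : List String) : Int :=
  ((path.drop 1).map (fun rel => if PySem.Str.isIn "..." rel then (2 : Int) else 1)).sum
def pvPairs (paths : List (List String)) : List (String × Int) :=
  paths.map (fun path => (pvKeyB path, pvCnt path))
-- the minimum count filed under a key (0 if the key never occurs)
def pvM (P : List (String × Int)) (k : String) : Int :=
  match (P.filter (fun p => p.1 == k)).map Prod.snd with
  | [] => 0
  | c :: cs => cs.foldl min c
-- A's dict-update step, rephrased on (key, count) pairs
def pvStepA (d : PySem.Dict String Int) (p : String × Int) : PySem.Dict String Int :=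
  d.insert p.1 (if d.contains p.1 = false then p.2 else min (d.getD p.1 0) p.2)
def pvDictA (P : List (String × Int)) : PySem.Dict String Int :=
  P.foldl pvStepA PySem.Dict.empty
-- A's dict loop verbatim
def pvDictA0 (paths : List (List String)) : PySem.Dict String Int :=
  paths.foldl
    (fun d path =>
      let k := (PySem.List.pyGet? path 0).getD ""
      if d.contains k = false then
        d.insert k (get_fact_cnt_4_path path)
      else
        d.insert k (min (d.getD k 0) (get_fact_cnt_4_path path)))
    PySem.Dict.empty

-- A's helper loop computes the canonical count
theorem pvCnt_eq (path : List String) : get_fact_cnt_4_path path = pvCnt path := by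
  unfold get_fact_cnt_4_path pvCnt
  rw [PySem.List.slice_from_one, ← List.drop_one]
  have hstep : (fun (ans : Int) (rel : String) => if PySem.Str.find rel "..." ≠ -1 then ans + 2 else ans + 1)
      = (fun (ans : Int) (rel : String) => ans + (if PySem.Str.isIn "..." rel then (2 : Int) else 1)) := by
    funext ans rel
    by_cases h : PySem.Str.find rel "..." = -1
    · have h2 : PySem.Str.isIn "..." rel = false := by
        rw [← Bool.not_eq_true, PySem.Str.isIn_iff_infix]
        exact (PySem.Str.find_eq_neg_one_iff rel "...").1 h
      rw [if_neg (not_not_intro h), h2]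
      norm_num
    · have h2 : PySem.Str.isIn "..." rel = true := by
        rw [PySem.Str.isIn_iff_infix]
        exact (PySem.Str.find_ne_neg_one_iff rel "...").1 h
      rw [if_pos h, h2]
      norm_num
  rw [hstep, PySem.List.foldl_add, zero_add]

-- a 2/1-valued sum is length plus a count
theorem pvSum21 (l : List String) :
    (l.map (fun rel => if PySem.Str.isIn "..." rel then (2 : Int) else 1)).sum
      = (l.length : Int) + (l.countP (fun rel => PySem.Str.isIn "..." rel) : Int) := by
  induction l with
  | nil => simp
  | cons y u ih =>
    rw [List.map_cons, List.sum_cons, List.countP_cons, List.length_cons, ih]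
    by_cases hy : PySem.Str.isIn "..." y = true
    · simp only [hy, if_pos]; push_cast; omega
    · rw [if_neg hy]; simp only [Bool.not_eq_true] at hy; simp only [hy]
      push_cast; omega

-- B's closed-form count agrees with the canonical count on nonempty paths
theorem pvCntB_eq (path : List String) (h : path ≠ []) : pvCntB path = pvCnt path := by
  unfold pvCntB pvCnt
  rw [PySem.List.slice_from_one, ← List.drop_one, PySem.List.len_eq, pvSum21]
  cases path with
  | nil => exact absurd rfl h
  | cons x t =>
    simp only [List.drop_one, List.tail_cons, List.length_cons]
    push_cast
    omega

-- invariant of A's dict loop: the stored value is the running minimum of the counts filed under the key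
theorem pvStepA_get? (l : List (String × Int)) (d : PySem.Dict String Int) (k : String) :
    (l.foldl pvStepA d).get? k =
      match d.get? k, (l.filter (fun p => p.1 == k)).map Prod.snd with
      | some v, cs => some (cs.foldl min v)
      | none, [] => none
      | none, c :: cs => some (cs.foldl min c) := by
  induction l generalizing d with
  | nil => cases h : d.get? k <;> simp [h]
  | cons p tl ih =>
    rw [List.foldl_cons, ih]
    by_cases hpk : p.1 = k
    · have hget : (pvStepA d p).get? k
          = some (if d.contains p.1 = false then p.2 else min (d.getD p.1 0) p.2) := by
        unfold pvStepA; rw [hpk, PySem.Dict.get?_insert_self]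
      have hfil : (p :: tl).filter (fun q => q.1 == k) = p :: tl.filter (fun q => q.1 == k) := by
        simp [hpk]
      rw [hget, hfil]
      cases hd : d.get? k with
      | none =>
        have hc : d.contains p.1 = false := by
          rw [hpk, PySem.Dict.contains_eq_isSome_get?, hd]; rfl
        simp [hc]
      | some v =>
        have hc : d.contains p.1 = true := by
          rw [hpk, PySem.Dict.contains_eq_isSome_get?, hd]; rfl
        have hgd : d.getD p.1 0 = v := by
          rw [hpk, PySem.Dict.getD_eq_get?_getD, hd]; rfl
        simp [hc, hgd]
    · have hget : (pvStepA d p).get? k = d.get? k := by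
        unfold pvStepA
        rw [PySem.Dict.get?_insert]
        exact if_neg (fun h => hpk h.symm)
      have hfil : (p :: tl).filter (fun q => q.1 == k) = tl.filter (fun q => q.1 == k) := by
        simp [hpk]
      rw [hget, hfil]

-- A's verbatim loop is pvStepA folded over the pair list
theorem pvDictA0_eq (paths : List (List String)) :
    pvDictA0 paths = pvDictA (pvPairs paths) := by
  unfold pvDictA0 pvDictA pvPairs
  rw [List.foldl_map]
  apply PySem.List.foldl_congr_mem
  intro d path _
  show (if d.contains (pvKeyB path) = false then _ else _) = pvStepA d (pvKeyB path, pvCnt path)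
  unfold pvStepA
  by_cases h : d.contains (pvKeyB path) = false
  · rw [if_pos h, if_pos h, pvCnt_eq]; rfl
  · rw [if_neg h, if_neg h, pvCnt_eq]; rfl

-- A's dict lists the distinct entities in first-occurrence order
theorem pvKeysA (P : List (String × Int)) :
    (pvDictA P).keys = PySem.Set.ofList (P.map Prod.fst) := by
  unfold pvDictA
  calc (P.foldl pvStepA PySem.Dict.empty).keys
      = PySem.Set.update (PySem.Dict.empty : PySem.Dict String Int).keys (P.map Prod.fst) :=
        PySem.Dict.keys_foldl_insert_key (l := P) (key := Prod.fst)
          (f := fun d p => if d.contains p.1 = false then p.2 else min (d.getD p.1 0) p.2)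
          (d := PySem.Dict.empty)
    _ = PySem.Set.ofList (P.map Prod.fst) := by
        rw [PySem.Dict.keys_empty, PySem.Set.update_nil_left]

-- dedup of a cons: head first, then dedup of the tail with the head filtered out
theorem pv_foldl_add_of_mem {α : Type} [BEq α] [LawfulBEq α] (l : List α) (s : PySem.Set α)
    (x : α) (hx : x ∈ s) :
    l.foldl PySem.Set.add s = (l.filter (fun y => y != x)).foldl PySem.Set.add s := by
  induction l generalizing s with
  | nil => rfl
  | cons y t ih =>
    rw [List.foldl_cons, List.filter_cons]
    by_cases hyx : y = x
    · subst hyx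
      have hadd : PySem.Set.add s y = s := by
        simp [PySem.Set.add, PySem.Set.contains, hx]
      simp only [bne_self_eq_false, Bool.false_eq_true, if_false, hadd]
      exact ih s hx
    · have hb : (y != x) = true := by simp [hyx]
      rw [hb, if_pos rfl, List.foldl_cons]
      exact ih _ ((PySem.Set.mem_add _ _ _).2 (Or.inl hx))

theorem pv_foldl_add_cons {α : Type} [BEq α] [LawfulBEq α] (l : List α) (s : List α) (x : α)
    (hl : x ∉ l) (hs : x ∉ s) :
    l.foldl PySem.Set.add (x :: s) = x :: l.foldl PySem.Set.add s := by
  induction l generalizing s with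
  | nil => rfl
  | cons y t ih =>
    have hyx : y ≠ x := fun h => hl (h ▸ List.mem_cons_self)
    have ht : x ∉ t := fun h => hl (List.mem_cons_of_mem _ h)
    rw [List.foldl_cons, List.foldl_cons]
    have hcons : PySem.Set.add (x :: s) y = x :: PySem.Set.add s y := by
      have hxy : (y == x) = false := by simp [hyx]
      simp only [PySem.Set.add, PySem.Set.contains, List.contains_cons, hxy, Bool.false_or]
      split_ifs <;> rfl
    rw [hcons]
    exact ih _ ht (fun hmem => (by
      rcases (PySem.Set.mem_add _ _ _).1 hmem with h | h
      · exact hs h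
      · exact hyx h.symm))

theorem pv_ofList_cons {α : Type} [BEq α] [LawfulBEq α] (x : α) (l : List α) :
    PySem.Set.ofList (x :: l) = x :: PySem.Set.ofList (l.filter (fun y => y != x)) := by
  rw [PySem.Set.ofList_eq_foldl, PySem.Set.ofList_eq_foldl, List.foldl_cons]
  show l.foldl PySem.Set.add [x] = _
  rw [pv_foldl_add_of_mem l [x] x List.mem_cons_self]
  exact pv_foldl_add_cons _ [] x (by simp) (by simp)

-- filtering out one key leaves the other keys' minima unchanged
theorem pvM_filter_ne (P : List (String × Int)) (k k' : String) (h : k' ≠ k) :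
    pvM (P.filter (fun q => q.1 != k)) k' = pvM P k' := by
  unfold pvM
  rw [List.filter_filter]
  congr 2
  apply List.filter_congr
  intro p _
  by_cases hp : p.1 = k'
  · simp [hp, h]
  · simp [hp]

-- B's recursion computes the sum, over the distinct entities, of their minimal counts
theorem pvAlt_eq (paths : List (List String)) (hpre : ∀ path ∈ paths, path ≠ []) :
    get_fact_cnt_4_item_alt paths
      = ((PySem.Set.ofList ((pvPairs paths).map Prod.fst)).map (pvM (pvPairs paths))).sum := by
  induction hlen : paths.length using Nat.strong_induction_on generalizing paths with
  | _ n ih =>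
  cases paths with
  | nil => simp [get_fact_cnt_4_item_alt, pvPairs, PySem.Set.ofList]
  | cons p rest =>
    subst hlen
    rw [get_fact_cnt_4_item_alt]
    set k := pvKeyB p with hk
    -- the recursive call
    set paths' := (p :: rest).filter (fun q => pvKeyB q != k) with hpaths'
    have hlen' : paths'.length < (p :: rest).length := by
      rw [hpaths', List.filter_cons]
      have hcond : (pvKeyB p != k) = false := by rw [hk]; simp
      rw [hcond]
      simp only [Bool.false_eq_true, if_false, List.length_cons]
      exact Nat.lt_succ_of_le (List.length_filter_le _ _)
    have hpre' : ∀ path ∈ paths', path ≠ [] := fun q hq => hpre q (List.mem_of_mem_filter hq)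
    have hrec := ih paths'.length hlen' paths' hpre' rfl
    -- pair-list bookkeeping
    have hPP : pvPairs paths' = (pvPairs (p :: rest)).filter (fun q => q.1 != k) := by
      rw [hpaths']
      unfold pvPairs
      rw [List.filter_map]
      rfl
    -- the min over the first entity's paths
    have hbest :
        ((p :: rest).filter (fun q => pvKeyB q == k)).map pvCntB
          = ((pvPairs (p :: rest)).filter (fun q => q.1 == k)).map Prod.snd := by
      unfold pvPairs
      rw [List.filter_map, List.map_map]
      show _ = ((p :: rest).filter (fun path => pvKeyB path == k)).map (fun path => pvCnt path)
      apply List.map_congr_left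
      intro q hq
      exact pvCntB_eq q (hpre q (List.mem_of_mem_filter hq))
    have hne : ((pvPairs (p :: rest)).filter (fun q => q.1 == k)).map Prod.snd ≠ [] := by
      have : (pvKeyB p, pvCnt p) ∈ (pvPairs (p :: rest)).filter (fun q => q.1 == k) := by
        rw [List.mem_filter]
        refine ⟨?_, by simp [hk]⟩
        unfold pvPairs
        rw [List.map_cons]
        exact List.mem_cons_self
      intro hcontra
      rw [List.map_eq_nil_iff] at hcontra
      rw [hcontra] at this
      exact List.not_mem_nil this
    obtain ⟨c, cs, hcs⟩ := List.exists_cons_of_ne_nil hne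
    have hbest2 :
        (PySem.List.min? (((p :: rest).filter (fun q => pvKeyB q == k)).map pvCntB)
          (fun x => x)).getD 0 = pvM (pvPairs (p :: rest)) k := by
      rw [hbest, hcs, PySem.List.min?_id_cons]
      unfold pvM
      rw [hcs]
      rfl
    -- the distinct-entity list splits as k :: (the rest's distinct entities)
    have h1 : (pvPairs (p :: rest)).map Prod.fst = k :: (pvPairs rest).map Prod.fst := rfl
    have h2 : (pvPairs paths').map Prod.fst
        = ((pvPairs rest).map Prod.fst).filter (fun y => y != k) := by
      rw [hPP]
      have hcomp : (fun q : String × Int => q.1 != k) = ((fun y => y != k) ∘ Prod.fst) := rfl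
      rw [hcomp, ← List.filter_map, h1, List.filter_cons]
      simp
    have hkeys :
        PySem.Set.ofList ((pvPairs (p :: rest)).map Prod.fst)
          = k :: PySem.Set.ofList ((pvPairs paths').map Prod.fst) := by
      rw [h1, pv_ofList_cons, h2]
    -- assemble
    rw [hrec, hbest2, hkeys, List.map_cons, List.sum_cons]
    congr 1
    apply congrArg List.sum
    apply List.map_congr_left
    intro k' hk'
    have hk'mem : k' ∈ (pvPairs paths').map Prod.fst := (PySem.Set.mem_ofList _ _).1 hk'
    have hk'ne : k' ≠ k := by
      rw [h2] at hk'mem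
      have := List.of_mem_filter hk'mem
      simpa using this
    rw [hPP]
    exact pvM_filter_ne _ _ _ hk'ne

-- ===== VERDICT (by name: the statement is the Claim_ definition above) =====
theorem get_fact_cnt_4_item_spec : Claim_equal_get_fact_cnt_4_item := by
  intro paths _ hpre
  unfold Spec_get_fact_cnt_4_item
  have hAdef : get_fact_cnt_4_item paths
      = (pvDictA0 paths).keys.foldl (fun ans ent => ans + (pvDictA0 paths).getD ent 0) 0 := rfl
  rw [hAdef, pvDictA0_eq paths, pvAlt_eq paths hpre]
  rw [PySem.List.foldl_add (g := fun ent => (pvDictA (pvPairs paths)).getD ent 0), zero_add]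
  rw [pvKeysA]
  apply congrArg List.sum
  apply List.map_congr_left
  intro k hk
  have hkP : k ∈ (pvPairs paths).map Prod.fst := (PySem.Set.mem_ofList _ _).1 hk
  have hne : ((pvPairs paths).filter (fun p => p.1 == k)).map Prod.snd ≠ [] := by
    obtain ⟨q, hq, hqk⟩ := List.mem_map.1 hkP
    have hmem : q ∈ (pvPairs paths).filter (fun r => r.1 == k) := by
      rw [List.mem_filter]; exact ⟨hq, by simp [hqk]⟩
    intro hcontra
    rw [List.map_eq_nil_iff] at hcontra
    rw [hcontra] at hmem
    exact List.not_mem_nil hmem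
  obtain ⟨c, cs, hcs⟩ := List.exists_cons_of_ne_nil hne
  have hgA : (pvDictA (pvPairs paths)).get? k = some (cs.foldl min c) := by
    have h := pvStepA_get? (pvPairs paths) PySem.Dict.empty k
    rw [PySem.Dict.get?_empty, hcs] at h
    exact h
  rw [PySem.Dict.getD_eq_get?_getD, hgA]
  unfold pvM
  rw [hcs]
  rfl
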